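-- pv_equiv track=rewrite | github.com/mengjihua/Binary-Battle | 周赛/第 466 场周赛/q3.py | bowlSubarrays
-- ===== SOURCE A (Python) =====
-- from typing import List, Tuple, Dict, Set, Optional
--
-- def bowlSubarrays(nums: List[int]) -> int:
--     n = len(nums)
--     pre = [-1] * n
--     st = []
--     for i in range(n):
--         while st and nums[st[-1]] <= nums[i]:
--             st.pop()
--         if st:
--             pre[i] = st[-1]
--         st.append(i)
--
--     suf = [-1] * n
--     st = []
--     for i in range(n - 1, -1, -1):
--         while st and nums[st[-1]] <= nums[i]:
--             st.pop()
--         if st: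
--             suf[i] = st[-1]
--         st.append(i)
--
--     ans = 0
--     for i in range(n):
--         if pre[i] != -1 and i - pre[i] > 1:
--             ans += 1
--         if suf[i] != -1 and suf[i] - i > 1:
--             ans += 1
--     return ans
-- ===== SOURCE B (Python) =====
-- def bowlSubarrays(nums):
--     # Simpler: no monotonic stacks, no pre/suf arrays; for each i scan directly
--     # for the nearest strictly greater element on each side.
--     n = len(nums)
--     ans = 0
--     for i in range(n):
--         for j in range(i - 1, -1, -1):
--             if nums[j] > nums[i]:
--                 if i - j > 1:
--                     ans += 1
--                 break
--         for j in range(i + 1, n):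
--             if nums[j] > nums[i]:
--                 if j - i > 1:
--                     ans += 1
--                 break
--     return ans
-- ===== Notes on version B (the rewrite author's own statement) =====
-- stated objective: simpler
-- what changed: Replaced the two monotonic-stack passes and the pre/suf index arrays by a single loop that, for each index, scans directly left and right for the nearest strictly greater element.
import Mathlib
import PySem

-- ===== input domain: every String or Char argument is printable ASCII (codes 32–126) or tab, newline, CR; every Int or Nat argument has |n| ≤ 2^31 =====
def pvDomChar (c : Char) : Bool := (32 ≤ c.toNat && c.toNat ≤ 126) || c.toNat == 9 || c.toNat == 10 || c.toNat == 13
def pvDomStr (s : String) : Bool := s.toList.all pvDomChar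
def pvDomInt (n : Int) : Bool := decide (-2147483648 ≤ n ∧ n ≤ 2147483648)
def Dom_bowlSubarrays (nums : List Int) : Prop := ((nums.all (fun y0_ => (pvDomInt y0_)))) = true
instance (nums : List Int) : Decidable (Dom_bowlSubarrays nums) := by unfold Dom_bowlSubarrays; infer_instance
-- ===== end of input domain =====

-- B replaces the two monotonic stacks and the pre/suf arrays by direct nearest-greater scans
-- from each index (simpler, no auxiliary arrays); same return value on every list.

-- ===== PORT A =====
-- nums[k] for an index k that the Python code only ever uses in range
def pyv (nums : List Int) (k : Nat) : Int := nums.getD k 0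

-- the Python `while st and nums[st[-1]] <= nums[i]: st.pop()` (stack top = list head; all indices in range)
def popLe (nums : List Int) (x : Int) : List Nat → List Nat
  | [] => []
  | j :: st => if pyv nums j ≤ x then popLe nums x st else j :: st

-- one iteration of either stack-loop body (the two Python loops have literally identical bodies)
def stackStep (nums : List Int) (s : List Int × List Nat) (i : Nat) : List Int × List Nat :=
  let st := popLe nums (pyv nums i) s.2
  let arr := match st with
    | [] => s.1
    | j :: _ => s.1.set i (j : Int)
  (arr, i :: st)

def bowlSubarrays (nums : List Int) : Int :=
  let n := nums.length
  let pre := ((List.range n).foldl (stackStep nums) (List.replicate n (-1), [])).1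
  let suf := ((List.range n).reverse.foldl (stackStep nums) (List.replicate n (-1), [])).1
  (List.range n).foldl (fun ans i =>
    let ans := if pre.getD i 0 ≠ -1 ∧ (i : Int) - pre.getD i 0 > 1 then ans + 1 else ans
    if suf.getD i 0 ≠ -1 ∧ suf.getD i 0 - (i : Int) > 1 then ans + 1 else ans) 0

-- ===== PORT B =====
-- `for j in range(i-1,-1,-1): if nums[j] > nums[i]: … break` — j counts down, argument is j+1
def scanL (nums : List Int) (x : Int) (i : Nat) : Nat → Int
  | 0 => 0
  | j + 1 => if pyv nums j > x then (if (i : Int) - (j : Int) > 1 then 1 else 0) else scanL nums x i j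

-- `for j in range(i+1,n): if nums[j] > nums[i]: … break` — j counts up, fuel = n - j
def scanR (nums : List Int) (x : Int) (i : Nat) : Nat → Nat → Int
  | _, 0 => 0
  | j, f + 1 => if pyv nums j > x then (if (j : Int) - (i : Int) > 1 then 1 else 0) else scanR nums x i (j + 1) f

def bowlSubarrays_alt (nums : List Int) : Int :=
  let n := nums.length
  (List.range n).foldl (fun ans i =>
    ans + scanL nums (pyv nums i) i i
        + scanR nums (pyv nums i) i (i + 1) (n - (i + 1))) 0

-- ===== PRECONDITION & SPEC =====
def Spec_bowlSubarrays (nums : List Int) (out : Int) : Prop := out = bowlSubarrays_alt nums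
instance (nums : List Int) (out : Int) : Decidable (Spec_bowlSubarrays nums out) := by unfold Spec_bowlSubarrays; infer_instance

-- ===== CLAIM (what is proved, stated in full; the proofs are below) =====
def Claim_equal_bowlSubarrays : Prop := ∀ (nums : List Int), Dom_bowlSubarrays nums → Spec_bowlSubarrays nums (bowlSubarrays nums)

-- ===== LEMMAS AND PROOFS =====

-- nearest j < i with nums[j] > x (scanning downward from i-1)
def ngLeft (nums : List Int) (x : Int) : Nat → Option Nat
  | 0 => none
  | j + 1 => if pyv nums j > x then some j else ngLeft nums x j

-- nearest j ≥ start with nums[j] > x, fuel bounded (scanning upward)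
def ngRight (nums : List Int) (x : Int) : Nat → Nat → Option Nat
  | _, 0 => none
  | j, f + 1 => if pyv nums j > x then some j else ngRight nums x (j + 1) f

-- stack of the first (left-to-right) Python loop after processing indices 0..i-1
def stkL (nums : List Int) : Nat → List Nat
  | 0 => []
  | i + 1 => i :: popLe nums (pyv nums i) (stkL nums i)

-- stack of the second (right-to-left) Python loop after processing indices n-1..i
def stkR (nums : List Int) (n : Nat) (i : Nat) : List Nat :=
  if _h : i < n then i :: popLe nums (pyv nums i) (stkR nums n (i + 1)) else []
termination_by n - i

-- the right-to-left fold, as downward recursion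
def runR (nums : List Int) (s : List Int × List Nat) : Nat → List Int × List Nat
  | 0 => s
  | i + 1 => runR nums (stackStep nums s i) i

def encOpt : Option Nat → Int
  | none => -1
  | some j => (j : Int)

lemma popLe_popLe (nums : List Int) {x y : Int} (h : y ≤ x) :
    ∀ st, popLe nums x (popLe nums y st) = popLe nums x st := by
  intro st
  induction st with
  | nil => simp [popLe]
  | cons j st ih =>
    by_cases hj : pyv nums j ≤ y
    · simp [popLe, hj, le_trans hj h, ih]
    · simp [popLe, hj]

lemma popLe_stkL_head (nums : List Int) :
    ∀ i x, (popLe nums x (stkL nums i)).head? = ngLeft nums x i := by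
  intro i
  induction i with
  | zero => intro x; simp [stkL, popLe, ngLeft]
  | succ i ih =>
    intro x
    by_cases h : pyv nums i ≤ x
    · have hx : ¬ pyv nums i > x := not_lt.mpr h
      simp [stkL, popLe, h, ngLeft, hx, popLe_popLe nums h, ih]
    · simp [stkL, popLe, h, ngLeft, lt_of_not_ge h]

lemma popLe_stkR_head (nums : List Int) (n : Nat) :
    ∀ i x, (popLe nums x (stkR nums n i)).head? = ngRight nums x i (n - i) := by
  intro i
  induction hi : n - i using Nat.strong_induction_on generalizing i with
  | _ f ih =>
    intro x
    cases f with
    | zero =>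
      have h1 : ¬ i < n := by omega
      simp [stkR, h1, popLe, ngRight]
    | succ f =>
      have hin : i < n := by omega
      have hstep : n - (i + 1) = f := by omega
      rw [stkR]
      simp only [hin, dite_true]
      by_cases h : pyv nums i ≤ x
      · have hx : ¬ pyv nums i > x := not_lt.mpr h
        rw [show popLe nums x (i :: popLe nums (pyv nums i) (stkR nums n (i+1)))
              = popLe nums x (popLe nums (pyv nums i) (stkR nums n (i+1))) by simp [popLe, h],
            popLe_popLe nums h, ← hi]
        rw [show n - i = f + 1 by omega]
        simp [ngRight, hx, ← hstep, ih f (by omega) (i+1) hstep]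
      · rw [← hi, show n - i = f + 1 by omega]
        simp [popLe, h, ngRight, lt_of_not_ge h]

lemma scanL_eq (nums : List Int) (x : Int) (i : Nat) :
    ∀ j, scanL nums x i j = (match ngLeft nums x j with
      | none => 0
      | some k => if (i : Int) - (k : Int) > 1 then (1 : Int) else 0) := by
  intro j
  induction j with
  | zero => simp [scanL, ngLeft]
  | succ j ih =>
    by_cases h : pyv nums j > x
    · simp [scanL, ngLeft, h]
    · simp [scanL, ngLeft, h, ih]

lemma scanR_eq (nums : List Int) (x : Int) (i : Nat) :
    ∀ f j, scanR nums x i j f = (match ngRight nums x j f with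
      | none => 0
      | some k => if (k : Int) - (i : Int) > 1 then (1 : Int) else 0) := by
  intro f
  induction f with
  | zero => intro j; simp [scanR, ngRight]
  | succ f ih =>
    intro j
    by_cases h : pyv nums j > x
    · simp [scanR, ngRight, h]
    · simp [scanR, ngRight, h, ih]

-- the left fold: state after processing 0..i-1
lemma foldL_state (nums : List Int) (n : Nat) (hn : n = nums.length) :
    ∀ i, i ≤ n →
      ∃ arr : List Int,
        (List.range i).foldl (stackStep nums) (List.replicate n (-1), []) = (arr, stkL nums i) ∧
        arr.length = n ∧
        (∀ k, k < n → arr.getD k 0 =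
          if k < i then encOpt (ngLeft nums (pyv nums k) k) else -1) := by
  intro i
  induction i with
  | zero =>
    intro _
    refine ⟨List.replicate n (-1), by simp [stkL], by simp, ?_⟩
    intro k hk
    simp [List.getD, hk]
  | succ i ih =>
    intro hi
    obtain ⟨arr, hfold, hlen, hval⟩ := ih (by omega)
    rw [List.range_succ, List.foldl_append, hfold]
    simp only [List.foldl_cons, List.foldl_nil]
    have hhead := popLe_stkL_head nums i (pyv nums i)
    cases hst : popLe nums (pyv nums i) (stkL nums i) with
    | nil =>
      have hng : ngLeft nums (pyv nums i) i = none := by rw [← hhead, hst]; rfl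
      refine ⟨arr, by simp [stackStep, hst, stkL], hlen, ?_⟩
      intro k hk
      rw [hval k hk]
      by_cases hki : k = i
      · subst hki; simp [hng, encOpt]
      · by_cases h1 : k < i
        · simp [h1, show k < i + 1 by omega]
        · simp [h1, show ¬ k < i + 1 by omega]
    | cons j st =>
      have hng : ngLeft nums (pyv nums i) i = some j := by rw [← hhead, hst]; rfl
      refine ⟨arr.set i (j : Int), by simp [stackStep, hst, stkL], by simpa using hlen, ?_⟩
      intro k hk
      by_cases hki : k = i
      · subst hki
        have h2 : (arr.set k (j : Int)).getD k 0 = (j : Int) := by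
          simp [List.getD, List.getElem?_set_self (by omega : k < arr.length)]
        simpa [hng, encOpt] using h2
      · have : (arr.set i (j : Int)).getD k 0 = arr.getD k 0 := by
          simp [List.getD, List.getElem?_set_ne (by omega : i ≠ k)]
        rw [this, hval k hk]
        by_cases h1 : k < i
        · simp [h1, show k < i + 1 by omega]
        · simp [h1, show ¬ k < i + 1 by omega]

lemma reverse_range_foldl (nums : List Int) :
    ∀ n s, (List.range n).reverse.foldl (stackStep nums) s = runR nums s n := by
  intro n
  induction n with
  | zero => intro s; simp [runR]
  | succ n ih => intro s; rw [List.range_succ]; simp [runR, ih]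

-- the right fold: running down from counter i with the matching stack and array
lemma runR_state (nums : List Int) (n : Nat) (hn : n = nums.length) :
    ∀ i, i ≤ n → ∀ arr : List Int, arr.length = n →
      (∀ k, k < n → arr.getD k 0 =
        if i ≤ k then encOpt (ngRight nums (pyv nums k) (k + 1) (n - (k + 1))) else -1) →
      ∀ k, k < n → (runR nums (arr, stkR nums n i) i).1.getD k 0 =
        encOpt (ngRight nums (pyv nums k) (k + 1) (n - (k + 1))) := by
  intro i
  induction i with
  | zero =>
    intro _ arr _ hval k hk
    simpa [runR] using (by simpa using hval k hk)
  | succ i ih =>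
    intro hi arr hlen hval k hk
    have hhead := popLe_stkR_head nums n (i + 1) (pyv nums i)
    have hstk : stkR nums n i = i :: popLe nums (pyv nums i) (stkR nums n (i + 1)) := by
      rw [stkR]; simp [show i < n by omega]
    rw [show runR nums (arr, stkR nums n (i+1)) (i + 1)
          = runR nums (stackStep nums (arr, stkR nums n (i+1)) i) i from rfl]
    cases hst : popLe nums (pyv nums i) (stkR nums n (i + 1)) with
    | nil =>
      have hng : ngRight nums (pyv nums i) (i + 1) (n - (i + 1)) = none := by
        rw [← hhead, hst]; rfl
      have hstep : stackStep nums (arr, stkR nums n (i+1)) i = (arr, stkR nums n i) := by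
        simp [stackStep, hst, hstk]
      rw [hstep]
      refine ih (by omega) arr hlen ?_ k hk
      intro k' hk'
      rw [hval k' hk']
      by_cases h1 : i + 1 ≤ k'
      · simp [h1, show i ≤ k' by omega]
      · by_cases h2 : k' = i
        · subst h2; simp [h1, hng, encOpt]
        · simp [h1, show ¬ i ≤ k' by omega]
    | cons j st =>
      have hng : ngRight nums (pyv nums i) (i + 1) (n - (i + 1)) = some j := by
        rw [← hhead, hst]; rfl
      have hstep : stackStep nums (arr, stkR nums n (i+1)) i = (arr.set i (j : Int), stkR nums n i) := by
        simp [stackStep, hst, hstk]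
      rw [hstep]
      refine ih (by omega) _ (by simpa using hlen) ?_ k hk
      intro k' hk'
      by_cases hki : k' = i
      · subst hki
        have h2 : (arr.set k' (j : Int)).getD k' 0 = (j : Int) := by
          simp [List.getD, List.getElem?_set_self (by omega : k' < arr.length)]
        simpa [hng, encOpt] using h2
      · have : (arr.set i (j : Int)).getD k' 0 = arr.getD k' 0 := by
          simp [List.getD, List.getElem?_set_ne (by omega : i ≠ k')]
        rw [this, hval k' hk']
        by_cases h1 : i + 1 ≤ k'
        · simp [h1, show i ≤ k' by omega]
        · simp [h1, show ¬ i ≤ k' by omega]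

-- pointwise equality of the two counting-loop bodies
lemma count_term_eq (i : Nat) (oL oR : Option Nat) (ans : Int) :
    (let a := if encOpt oL ≠ -1 ∧ (i : Int) - encOpt oL > 1 then ans + 1 else ans
     if encOpt oR ≠ -1 ∧ encOpt oR - (i : Int) > 1 then a + 1 else a) =
    ans + (match oL with | none => 0 | some k => if (i : Int) - (k : Int) > 1 then (1:Int) else 0)
        + (match oR with | none => 0 | some k => if (k : Int) - (i : Int) > 1 then (1:Int) else 0) := by
  cases oL <;> cases oR <;> simp [encOpt] <;> split_ifs <;> omega

theorem bowlSubarrays_spec : Claim_equal_bowlSubarrays := by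
  intro nums _
  unfold Spec_bowlSubarrays bowlSubarrays bowlSubarrays_alt
  dsimp only
  obtain ⟨pre, hfold, _hlenp, hpre⟩ :=
    foldL_state nums nums.length rfl nums.length le_rfl
  have hstkn : stkR nums nums.length nums.length = [] := by rw [stkR]; simp
  have hsuf := runR_state nums nums.length rfl nums.length le_rfl
      (List.replicate nums.length (-1)) (by simp)
      (by intro k hk
          simp [List.getD, hk, show ¬ nums.length ≤ k by omega])
  rw [hstkn] at hsuf
  rw [hfold, reverse_range_foldl]
  refine PySem.List.foldl_congr_mem _ _ _ _ ?_
  intro ans i hi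
  have hi' : i < nums.length := List.mem_range.mp hi
  rw [scanL_eq, scanR_eq]
  have e1 : pre.getD i 0 = encOpt (ngLeft nums (pyv nums i) i) := by
    have := hpre i hi'
    simpa [hi'] using this
  have e2 : (runR nums (List.replicate nums.length (-1), []) nums.length).1.getD i 0
      = encOpt (ngRight nums (pyv nums i) (i + 1) (nums.length - (i + 1))) := hsuf i hi'
  show (let a := if pre.getD i 0 ≠ -1 ∧ (i : Int) - pre.getD i 0 > 1 then ans + 1 else ans
        if (runR nums (List.replicate nums.length (-1), []) nums.length).1.getD i 0 ≠ -1 ∧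
           (runR nums (List.replicate nums.length (-1), []) nums.length).1.getD i 0 - (i : Int) > 1
        then a + 1 else a) = _
  rw [e1, e2]
  exact count_term_eq i _ _ ans
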